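-- pv_equiv track=rewrite | github.com/daniel-reich/ubiquitous-fiesta | epMcaSNzBFSF5uB89_11.py | currently_winning
-- ===== SOURCE A (Python) =====
-- def currently_winning(scores):
--   you=scores[::2]
--   opp=scores[1::2]
--   ans=[]
--   for i in range(1,len(you)+1):
--     a=sum(you[:i])-sum(opp[:i])
--     if a==0:ans.append('T')
--     elif a>0:ans.append('Y')
--     else: ans.append('O')
--   return ans
-- ===== SOURCE B (Python) =====
-- def currently_winning(scores):
--     # One pass: keep a running cumulative difference (your points minus
--     # opponent's), consuming one round (two scores) at a time.
--     ans = []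
--     diff = 0
--     rest = scores
--     while rest:
--         diff += rest[0] - (rest[1] if len(rest) > 1 else 0)
--         ans.append('T' if diff == 0 else 'Y' if diff > 0 else 'O')
--         rest = rest[2:]
--     return ans
-- ===== Notes on version B (the rewrite author's own statement) =====
-- stated objective: faster
-- what changed: B replaces the per-prefix re-summation of both slices with a single pass that maintains one running cumulative difference, appending its sign per round.
import Mathlib
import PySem

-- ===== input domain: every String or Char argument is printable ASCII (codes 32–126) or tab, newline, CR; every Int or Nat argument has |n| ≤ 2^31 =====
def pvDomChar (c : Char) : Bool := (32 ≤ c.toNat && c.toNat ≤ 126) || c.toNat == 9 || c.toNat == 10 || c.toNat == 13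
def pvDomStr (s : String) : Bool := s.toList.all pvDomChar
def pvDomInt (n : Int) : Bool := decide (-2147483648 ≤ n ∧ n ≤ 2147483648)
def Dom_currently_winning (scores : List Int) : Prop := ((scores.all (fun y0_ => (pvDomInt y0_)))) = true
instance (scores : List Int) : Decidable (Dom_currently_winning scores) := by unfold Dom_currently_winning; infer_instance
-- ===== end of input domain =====

-- B replaces A's per-prefix re-summation of both slices with a single pass keeping
-- one running cumulative difference (objective: faster).

-- ===== PORT A =====
-- scores[::2]: full-list step-2 slice, ported by hand (exact: every second element from the front)
def pvEvery2 : List Int → List Int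
  | [] => []
  | [a] => [a]
  | a :: _ :: rest => a :: pvEvery2 rest

def currently_winning (scores : List Int) : List String :=
  let you := pvEvery2 scores          -- scores[::2]
  let opp := pvEvery2 scores.tail     -- scores[1::2]
  (PySem.List.pyRange 1 ((you.length : Int) + 1) 1).foldl
    (fun ans i =>
      let a := (PySem.List.slice you none (some i)).sum - (PySem.List.slice opp none (some i)).sum
      if a = 0 then ans ++ ["T"]
      else if a > 0 then ans ++ ["Y"]
      else ans ++ ["O"]) []

-- ===== PORT B =====
def pvSign (d : Int) : String := if d = 0 then "T" else if d > 0 then "Y" else "O"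

def pvGo (diff : Int) : List Int → List String
  | [] => []
  | [a] => [pvSign (diff + a)]
  | a :: b :: rest => pvSign (diff + a - b) :: pvGo (diff + a - b) rest

def currently_winning_alt (scores : List Int) : List String := pvGo 0 scores

-- ===== PRECONDITION & SPEC =====
def Spec_currently_winning (scores : List Int) (out : List String) : Prop := out = currently_winning_alt scores
instance (scores : List Int) (out : List String) : Decidable (Spec_currently_winning scores out) := by unfold Spec_currently_winning; infer_instance

-- ===== CLAIM (what is proved, stated in full; the proofs are below) =====
def Claim_equal_currently_winning : Prop := ∀ (scores : List Int), Dom_currently_winning scores → Spec_currently_winning scores (currently_winning scores)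

-- ===== LEMMAS AND PROOFS =====

lemma pvEvery2_cons_tail (b : Int) (rest : List Int) :
    pvEvery2 (b :: rest) = b :: pvEvery2 rest.tail := by
  cases rest <;> simp [pvEvery2]

lemma pvRange_shift (a b : Int) :
    PySem.List.pyRange (a+1) (b+1) 1 = (PySem.List.pyRange a b 1).map (· + 1) := by
  rw [PySem.List.pyRange_one, PySem.List.pyRange_one, List.map_map]
  have h : b + 1 - (a + 1) = b - a := by ring
  rw [h]
  apply List.map_congr_left
  intro k _
  simp; ring

lemma pvGo_eq (l : List Int) (diff : Int) :
    (PySem.List.pyRange 1 (((pvEvery2 l).length : Int) + 1) 1).map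
      (fun i => pvSign (diff + ((pvEvery2 l).take i.toNat).sum - ((pvEvery2 l.tail).take i.toNat).sum))
    = pvGo diff l := by
  induction l using pvEvery2.induct generalizing diff with
  | case1 =>
    simp [pvEvery2, pvGo, PySem.List.pyRange_one_eq_nil]
  | case2 a =>
    rw [show ((pvEvery2 [a]).length : Int) + 1 = 1 + 1 by simp [pvEvery2]]
    rw [PySem.List.pyRange_one_singleton]
    simp [pvEvery2, pvGo]
  | case3 a b rest ih =>
    have hE : pvEvery2 (a :: b :: rest) = a :: pvEvery2 rest := rfl
    have hO : (a :: b :: rest).tail = b :: rest := rfl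
    rw [hE, hO, pvEvery2_cons_tail]
    set n : Int := ((pvEvery2 rest).length : Int) with hn
    have hlen : ((a :: pvEvery2 rest).length : Int) = n + 1 := by
      simp [hn]
    rw [hlen]
    rw [PySem.List.pyRange_one_cons (by have : (0:Int) ≤ n := Int.natCast_nonneg _; omega)]
    rw [show (1:Int) + 1 = 1 + 1 from rfl,
        show n + 1 + 1 = (n + 1) + 1 from rfl, pvRange_shift]
    rw [List.map_cons, List.map_map]
    have hhead : pvSign (diff + ((a :: pvEvery2 rest).take (Int.toNat 1)).sum
        - ((b :: pvEvery2 rest.tail).take (Int.toNat 1)).sum) = pvSign (diff + a - b) := by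
      norm_num
    have htail :
        (PySem.List.pyRange 1 (n + 1) 1).map
          ((fun i => pvSign (diff + ((a :: pvEvery2 rest).take i.toNat).sum
              - ((b :: pvEvery2 rest.tail).take i.toNat).sum)) ∘ (· + 1))
        = pvGo (diff + a - b) rest := by
      rw [← ih (diff + a - b)]
      apply List.map_congr_left
      intro i hi
      have h1 : 1 ≤ i := (PySem.List.mem_pyRange_one.mp hi).1
      have ht : (i + 1).toNat = i.toNat + 1 := by omega
      simp only [Function.comp, ht, List.take_succ_cons, List.sum_cons]
      congr 1
      ring
    rw [hhead, htail]
    rfl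

-- ===== VERDICT (by name: the statement is the Claim_ definition above) =====
theorem currently_winning_spec : Claim_equal_currently_winning := by
  intro scores _
  show currently_winning scores = currently_winning_alt scores
  simp only [currently_winning, currently_winning_alt]
  have hfold :
      (PySem.List.pyRange 1 (((pvEvery2 scores).length : Int) + 1) 1).foldl
        (fun ans i =>
          if (PySem.List.slice (pvEvery2 scores) none (some i)).sum
              - (PySem.List.slice (pvEvery2 scores.tail) none (some i)).sum = 0 then ans ++ ["T"]
          else if (PySem.List.slice (pvEvery2 scores) none (some i)).sum
              - (PySem.List.slice (pvEvery2 scores.tail) none (some i)).sum > 0 then ans ++ ["Y"]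
          else ans ++ ["O"]) []
      = (PySem.List.pyRange 1 (((pvEvery2 scores).length : Int) + 1) 1).foldl
        (fun ans i => ans ++ [pvSign (0 + ((pvEvery2 scores).take i.toNat).sum
            - ((pvEvery2 scores.tail).take i.toNat).sum)]) [] := by
    apply PySem.List.foldl_congr_mem
    intro acc i hi
    have h1 : 1 ≤ i := (PySem.List.mem_pyRange_one.mp hi).1
    rw [PySem.List.slice_to (xs := pvEvery2 scores) (b := i) (by omega),
        PySem.List.slice_to (xs := pvEvery2 scores.tail) (b := i) (by omega)]
    simp only [pvSign, zero_add]
    split_ifs <;> rfl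
  rw [hfold, PySem.List.foldl_append_singleton_eq_map, List.nil_append]
  exact pvGo_eq scores 0
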